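-- pv_equiv track=rewrite | github.com/KarenSRG/Meduza | src/bot/porducer_commands/register_producer.py | parse_conf_code
-- ===== SOURCE A (Python) =====
-- def parse_conf_code(conf_code: str) -> str:
--     letter_list = ["J", "A", "B", "C", "D", "E", "F", "G", "H", "I"]
--     result = ""
--
--     for letter in conf_code.upper():
--         if letter not in letter_list:
--             return "invalid conf code"
--         result += str(letter_list.index(letter))
--     return result
-- ===== SOURCE B (Python) =====
-- def parse_conf_code(conf_code: str) -> str:
--     mapping = {c: str(i) for i, c in enumerate("JABCDEFGHI")}
--     up = conf_code.upper()
--     if all(c in mapping for c in up):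
--         return "".join(mapping[c] for c in up)
--     return "invalid conf code"
-- ===== Notes on version B (the rewrite author's own statement) =====
-- stated objective: idiomatic
-- what changed: Replaces the per-character loop with inline list.index and mid-loop early return by a validate-all-then-bulk-translate decomposition: a digit dict built once, an all() membership check, then one join over a mapped pass.
import Mathlib
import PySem

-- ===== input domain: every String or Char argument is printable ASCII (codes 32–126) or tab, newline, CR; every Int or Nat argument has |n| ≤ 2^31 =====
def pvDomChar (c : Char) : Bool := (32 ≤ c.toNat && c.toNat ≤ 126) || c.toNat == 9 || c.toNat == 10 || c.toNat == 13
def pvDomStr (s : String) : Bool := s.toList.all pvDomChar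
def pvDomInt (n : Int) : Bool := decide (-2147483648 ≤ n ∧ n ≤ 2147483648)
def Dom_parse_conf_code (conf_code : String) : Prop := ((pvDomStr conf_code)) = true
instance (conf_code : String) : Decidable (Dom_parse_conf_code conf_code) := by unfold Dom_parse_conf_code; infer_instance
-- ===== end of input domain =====

-- B replaces A's per-character loop (membership test + list.index + early return) by a
-- validate-all-then-bulk-translate decomposition over a digit dict; same cost, more idiomatic.

-- ===== PORT A =====
def pcLetters : List Char := ['J', 'A', 'B', 'C', 'D', 'E', 'F', 'G', 'H', 'I']

-- the for-loop of A: state is the accumulated `result`; early return on a bad letter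
def pcGo : List Char → String → String
  | [], result => result
  | letter :: rest, result =>
    if pcLetters.contains letter = false then "invalid conf code"
    else pcGo rest (result ++ PySem.Int.toStr (((PySem.List.index? pcLetters letter).getD 0 : ℕ) : ℤ))

def parse_conf_code (conf_code : String) : String :=
  pcGo (PySem.Str.upper conf_code).toList ""

-- ===== PORT B =====
-- {c: str(i) for i, c in enumerate("JABCDEFGHI")}
def pcMap : PySem.Dict Char String :=
  PySem.Dict.ofList [('J', "0"), ('A', "1"), ('B', "2"), ('C', "3"), ('D', "4"),
                     ('E', "5"), ('F', "6"), ('G', "7"), ('H', "8"), ('I', "9")]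

def parse_conf_code_alt (conf_code : String) : String :=
  let up := (PySem.Str.upper conf_code).toList
  if up.all (fun c => pcMap.contains c) then
    PySem.Str.join "" (up.map (fun c => pcMap.getD c ""))
  else "invalid conf code"

-- ===== PRECONDITION & SPEC =====
def Spec_parse_conf_code (conf_code : String) (out : String) : Prop := out = parse_conf_code_alt conf_code
instance (conf_code : String) (out : String) : Decidable (Spec_parse_conf_code conf_code out) := by unfold Spec_parse_conf_code; infer_instance

-- ===== CLAIM (what is proved, stated in full; the proofs are below) =====
def Claim_equal_parse_conf_code : Prop := ∀ (conf_code : String), Dom_parse_conf_code conf_code → Spec_parse_conf_code conf_code (parse_conf_code conf_code)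

-- ===== LEMMAS AND PROOFS =====
theorem pc_contains_eq (c : Char) : pcMap.contains c = pcLetters.contains c := by
  simp [pcMap, pcLetters, PySem.Dict.ofList, PySem.Dict.update, List.foldl,
    PySem.Dict.contains_insert, PySem.Dict.contains_empty]
  rw [Bool.eq_iff_iff]
  simp
  tauto

theorem pc_val_eq (c : Char) (h : pcLetters.contains c = true) :
    pcMap.getD c "" = PySem.Int.toStr (((PySem.List.index? pcLetters c).getD 0 : ℕ) : ℤ) := by
  simp [pcLetters] at h
  rcases h with h | h | h | h | h | h | h | h | h | h <;> subst h <;> decide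

theorem pc_join_empty_cons (p : String) (rest : List String) :
    PySem.Str.join "" (p :: rest) = p ++ PySem.Str.join "" rest := by
  apply String.toList_inj.mp
  cases rest with
  | nil =>
    simp [PySem.Str.toList_join, String.toList_append, PySem.Chars.join_singleton,
      PySem.Chars.join_nil]
  | cons q t =>
    simp [PySem.Str.toList_join, String.toList_append, PySem.Chars.join_cons_cons]

theorem pc_join_empty_nil : PySem.Str.join "" ([] : List String) = "" := by
  apply String.toList_inj.mp
  simp [PySem.Str.toList_join, PySem.Chars.join_nil]

theorem pc_go_eq (l : List Char) (acc : String) :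
    pcGo l acc =
      if l.all (fun c => pcMap.contains c) then
        acc ++ PySem.Str.join "" (l.map (fun c => pcMap.getD c ""))
      else "invalid conf code" := by
  induction l generalizing acc with
  | nil => simp [pcGo, pc_join_empty_nil]
  | cons c rest ih =>
    by_cases hc : pcLetters.contains c = true
    · have hm : pcMap.contains c = true := by rw [pc_contains_eq]; exact hc
      simp only [pcGo, hc, Bool.true_eq_false, if_false, List.all_cons, List.map_cons, hm,
        Bool.true_and, ih, pc_join_empty_cons, pc_val_eq c hc]
      split
      · rw [String.append_assoc]
      · rfl
    · have hc' : pcLetters.contains c = false := by simpa using hc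
      have hm : pcMap.contains c = false := by rw [pc_contains_eq]; exact hc'
      simp only [pcGo, hc', reduceIte, List.all_cons, hm, Bool.false_and, Bool.false_eq_true,
        if_false]

-- ===== VERDICT (by name: the statement is the Claim_ definition above) =====
theorem parse_conf_code_spec : Claim_equal_parse_conf_code := by
  intro conf_code _
  unfold Spec_parse_conf_code parse_conf_code parse_conf_code_alt
  rw [pc_go_eq]
  by_cases h : ((PySem.Str.upper conf_code).toList.all fun c => pcMap.contains c) = true
  · simp only [h, if_true]
    exact String.toList_inj.mp (by simp)
  · simp only [h, Bool.false_eq_true, if_false]
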